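-- pv_equiv track=rewrite | github.com/haolyuan/pressure_tookit | syncInsole.py | syncTwoSequences
-- ===== SOURCE A (Python) =====
-- def syncTwoSequences(seq1, seq2):
--     indice = []
--     start_j = 0
--     for i in range(len(seq1)):
--         min_dist = 999999999.9
--         matched_j = 0
--         for j in range(len(seq2)):
--             dist = abs(seq1[i] - seq2[j])
--             if (dist <= min_dist):
--                 min_dist = dist
--                 matched_j = j
--             if dist > min_dist: break
--         start_j = matched_j
--         indice.append(matched_j)
--
--     return indice
-- ===== SOURCE B (Python) =====
-- def _bisect_right(s, x):
--     lo, hi = 0, len(s)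
--     while lo < hi:
--         mid = (lo + hi) // 2
--         if x < s[mid]:
--             hi = mid
--         else:
--             lo = mid + 1
--     return lo
--
--
-- def _sync_asc(seq1, seq2):
--     # seq2 nonempty and sorted non-decreasing
--     n = len(seq2)
--     out = []
--     for x in seq1:
--         hi = _bisect_right(seq2, x)
--         if hi == 0:
--             # all elements are > x: nearest value is seq2[0]; pick its last occurrence
--             out.append(_bisect_right(seq2, seq2[0]) - 1)
--         elif hi == n:
--             out.append(hi - 1)
--         else:
--             dl = x - seq2[hi - 1]
--             dr = seq2[hi] - x
--             if dl < dr: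
--                 out.append(hi - 1)
--             else:
--                 # tie or right side closer: last occurrence of seq2[hi]
--                 out.append(_bisect_right(seq2, seq2[hi]) - 1)
--     return out
--
--
-- def syncTwoSequences(seq1, seq2):
--     if not seq2:
--         return [0] * len(seq1)
--     if seq2[0] > seq2[-1]:
--         # non-increasing seq2: negating everything preserves all distances and
--         # reduces to the non-decreasing case
--         return _sync_asc([-x for x in seq1], [-v for v in seq2])
--     return _sync_asc(seq1, seq2)
-- ===== Notes on version B (the rewrite author's own statement) =====
-- stated objective: faster
-- what changed: Replaces A's per-query linear scan of seq2 (early break at the first distance increase) by a binary search per query (bisect_right plus a two-candidate comparison, ties and duplicates resolved to the largest index; a non-increasing seq2 is reduced to the non-decreasing case by negating all values), under the precondition that seq2 is monotone.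
-- intended difference: On inputs where some seq1 element is farther than 999999999 from seq2[0] while seq2[1] is no farther than seq2[0], A's float sentinel 999999999.9 is exceeded by the very first integer distance so A breaks immediately and returns index 0 for that query, while B returns the index of the genuinely nearest element, which is what the sync function intends. — e.g. on syncTwoSequences([1000000001], [0, 1000000001]): A returns [0], B returns [1]
-- outside the precondition, e.g. on syncTwoSequences([7, -4], [9, 3, 6, 7]): A returns [0, 1], B returns [0, 3]; on syncTwoSequences([-4], [6, 8, 7, 5, 5]): A returns [0], B returns [4]
import Mathlib
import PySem

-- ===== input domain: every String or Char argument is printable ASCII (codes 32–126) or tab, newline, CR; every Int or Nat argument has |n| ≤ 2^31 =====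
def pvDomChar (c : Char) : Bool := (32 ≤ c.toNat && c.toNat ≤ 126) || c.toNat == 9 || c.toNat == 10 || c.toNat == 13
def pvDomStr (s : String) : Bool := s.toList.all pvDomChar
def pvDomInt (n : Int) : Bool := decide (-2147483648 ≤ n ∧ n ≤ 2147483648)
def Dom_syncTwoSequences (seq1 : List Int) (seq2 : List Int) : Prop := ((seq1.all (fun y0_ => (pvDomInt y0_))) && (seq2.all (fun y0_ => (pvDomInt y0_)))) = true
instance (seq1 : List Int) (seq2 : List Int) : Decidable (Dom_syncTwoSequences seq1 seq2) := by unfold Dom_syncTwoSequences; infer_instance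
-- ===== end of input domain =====

-- B replaces A's per-query linear scan (with early break) by a binary search per query
-- (bisect_right + two-candidate comparison, ties/duplicates to the largest index; a
-- non-increasing seq2 is reduced to the non-decreasing case by negation); Pre_ requires
-- seq2 monotone, and D_ states the intended difference at A's 999999999.9 float sentinel.


-- ===== PORT A =====
-- Inner loop of A over seq2 (state: current index j, min_dist, matched_j).
-- A's min_dist starts at the float 999999999.9; every compared dist is an integer, and for an
-- integer d we have d ≤ 999999999.9 ↔ d ≤ 999999999 and d > 999999999.9 ↔ d > 999999999,
-- so the port carries the Int 999999999 (exact). A's variable start_j is written but never read; dropped.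
def innerA (x : Int) : List Int → Nat → Int → Nat → Nat
  | [], _, _, matched => matched
  | y :: rest, j, m, matched =>
    let d := |x - y|
    let m' := if d ≤ m then d else m
    let matched' := if d ≤ m then j else matched
    if m' < d then matched' else innerA x rest (j + 1) m' matched'

def syncTwoSequences (seq1 : List Int) (seq2 : List Int) : List Int :=
  seq1.foldl (fun indice xi => indice ++ [((innerA xi seq2 0 999999999 0 : Nat) : Int)]) []

-- ===== PORT B =====
-- _bisect_right of Source B: binary search, first index whose element is > x.
def brLoop (s : List Int) (x : Int) (lo hi : Nat) : Nat :=
  if h : lo < hi then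
    if x < s.getD ((lo + hi) / 2) 0 then brLoop s x lo ((lo + hi) / 2)
    else brLoop s x ((lo + hi) / 2 + 1) hi
  else lo
termination_by hi - lo
decreasing_by all_goals omega

def bisectRight (s : List Int) (x : Int) : Nat := brLoop s x 0 s.length

-- per-query computation of Source B's _sync_asc (seq2 nonempty, non-decreasing)
def altIdx (x : Int) (s : List Int) : Nat :=
  let n := s.length
  let hi := bisectRight s x
  if hi = 0 then bisectRight s (s.getD 0 0) - 1
  else if hi = n then hi - 1
  else
    let dl := x - s.getD (hi - 1) 0
    let dr := s.getD hi 0 - x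
    if dl < dr then hi - 1 else bisectRight s (s.getD hi 0) - 1

-- _sync_asc of Source B
def syncAsc (seq1 : List Int) (s : List Int) : List Int :=
  seq1.map (fun x => ((altIdx x s : Nat) : Int))

def syncTwoSequences_alt (seq1 : List Int) (seq2 : List Int) : List Int :=
  if seq2.length = 0 then seq1.map (fun _ => (0 : Int))
  else if seq2.getD (seq2.length - 1) 0 < seq2.getD 0 0 then
    syncAsc (seq1.map (fun x => -x)) (seq2.map (fun v => -v))
  else syncAsc seq1 seq2

-- ===== PRECONDITION & SPEC =====
-- Pre_ excludes non-monotone seq2: there A's early break stops at an accidental local minimum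
-- of the scan order, a value that depends on A's traversal and that no nearest-index
-- reimplementation should reproduce.
def Pre_syncTwoSequences (seq1 : List Int) (seq2 : List Int) : Prop :=
  List.Pairwise (· ≤ ·) seq2 ∨ List.Pairwise (· ≥ ·) seq2
instance (seq1 : List Int) (seq2 : List Int) : Decidable (Pre_syncTwoSequences seq1 seq2) := by
  unfold Pre_syncTwoSequences; infer_instance

def pvWitness_syncTwoSequences : List Int × List Int := ([4, 7], [1, 5, 9])

-- On inputs where some seq1 element is farther than 999999999 from seq2[0] while seq2[1] is no
-- farther than seq2[0], A's float sentinel 999999999.9 is exceeded by the very first integer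
-- distance so A breaks immediately and returns 0 for that query, while B returns the index of
-- the genuinely nearest element, which is what the sync function intends.
def D_syncTwoSequences (seq1 : List Int) (seq2 : List Int) : Prop :=
  ∃ x ∈ seq1, 2 ≤ seq2.length ∧ 999999999 < |x - seq2.getD 0 0| ∧
    |x - seq2.getD 1 0| ≤ |x - seq2.getD 0 0|
instance (seq1 : List Int) (seq2 : List Int) : Decidable (D_syncTwoSequences seq1 seq2) := by
  unfold D_syncTwoSequences; infer_instance

def Spec_syncTwoSequences (seq1 : List Int) (seq2 : List Int) (out : List Int) : Prop := ¬ D_syncTwoSequences seq1 seq2 → out = syncTwoSequences_alt seq1 seq2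
instance (seq1 : List Int) (seq2 : List Int) (out : List Int) : Decidable (Spec_syncTwoSequences seq1 seq2 out) := by unfold Spec_syncTwoSequences; infer_instance

def pvDiffWitness_syncTwoSequences : List Int × List Int := ([1000000001], [0, 1000000001])
def pvDiffWitnessOut_syncTwoSequences : (List Int) × (List Int) := ([0], [1])

-- ===== CLAIM (what is proved, stated in full; the proofs are below) =====
def Claim_unchanged_syncTwoSequences : Prop := ∀ (seq1 : List Int) (seq2 : List Int), Dom_syncTwoSequences seq1 seq2 → Pre_syncTwoSequences seq1 seq2 → Spec_syncTwoSequences seq1 seq2 (syncTwoSequences seq1 seq2)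
def Claim_changed_syncTwoSequences : Prop := Dom_syncTwoSequences (pvDiffWitness_syncTwoSequences.1) (pvDiffWitness_syncTwoSequences.2) ∧ Pre_syncTwoSequences (pvDiffWitness_syncTwoSequences.1) (pvDiffWitness_syncTwoSequences.2) ∧ D_syncTwoSequences (pvDiffWitness_syncTwoSequences.1) (pvDiffWitness_syncTwoSequences.2) ∧ syncTwoSequences (pvDiffWitness_syncTwoSequences.1) (pvDiffWitness_syncTwoSequences.2) = pvDiffWitnessOut_syncTwoSequences.1 ∧ syncTwoSequences_alt (pvDiffWitness_syncTwoSequences.1) (pvDiffWitness_syncTwoSequences.2) = pvDiffWitnessOut_syncTwoSequences.2 ∧ pvDiffWitnessOut_syncTwoSequences.1 ≠ pvDiffWitnessOut_syncTwoSequences.2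
def Claim_exact_syncTwoSequences : Prop := ∀ (seq1 : List Int) (seq2 : List Int), Dom_syncTwoSequences seq1 seq2 → Pre_syncTwoSequences seq1 seq2 → D_syncTwoSequences seq1 seq2 → syncTwoSequences seq1 seq2 ≠ syncTwoSequences_alt seq1 seq2

-- ===== LEMMAS AND PROOFS =====

-- number of elements ≤ x (= bisect_right on a sorted list)
def countLE (x : Int) (s : List Int) : Nat := s.countP (fun y => decide (y ≤ x))

-- length of the maximal prefix of the scan on which the distance to x never increases
def fChain (x : Int) : Int → List Int → Nat
  | _, [] => 0
  | prev, z :: r => if |x - z| ≤ |x - prev| then 1 + fChain x z r else 0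

lemma foldl_app_eq_map (g : Int → Int) :
    ∀ (l acc : List Int), l.foldl (fun a x => a ++ [g x]) acc = acc ++ l.map g := by
  intro l
  induction l with
  | nil => simp
  | cons y r ih => intro acc; simp [List.foldl_cons, ih]

lemma innerA_chain (x : Int) :
    ∀ (rest : List Int) (y : Int) (j : Nat),
      innerA x rest (j + 1) |x - y| j = j + fChain x y rest := by
  intro rest
  induction rest with
  | nil => intro y j; simp [innerA, fChain]
  | cons z r ih =>
    intro y j
    by_cases h : |x - z| ≤ |x - y|
    · simp only [innerA, fChain, if_pos h]
      have h2 : ¬ (|x - z| < |x - z|) := lt_irrefl _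
      rw [if_neg h2, ih z (j + 1)]
      omega
    · simp only [innerA, fChain, if_neg h]
      rw [if_pos (by omega)]
      omega

lemma innerA_top (x y : Int) (r : List Int) (h : |x - y| ≤ 999999999) :
    innerA x (y :: r) 0 999999999 0 = fChain x y r := by
  simp only [innerA, if_pos h]
  rw [if_neg (lt_irrefl _), innerA_chain x r y 0]
  omega

lemma countLE_cons (x y : Int) (r : List Int) :
    countLE x (y :: r) = (if y ≤ x then 1 else 0) + countLE x r := by
  simp only [countLE, List.countP_cons, decide_eq_true_eq]
  split_ifs <;> omega

lemma countLE_le_length (x : Int) (s : List Int) : countLE x s ≤ s.length :=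
  List.countP_le_length

lemma countLE_eq_zero (x : Int) (s : List Int) (h : ∀ z ∈ s, x < z) : countLE x s = 0 := by
  rw [countLE, List.countP_eq_zero]
  intro z hz
  have := h z hz
  simp only [decide_eq_true_eq]
  omega

lemma countLE_iff (x : Int) :
    ∀ (s : List Int), List.Pairwise (· ≤ ·) s → ∀ i, i < s.length →
      (s.getD i 0 ≤ x ↔ i < countLE x s) := by
  intro s
  induction s with
  | nil => intro _ i hi; simp at hi
  | cons y r ih =>
    intro hp i hi
    rcases List.pairwise_cons.1 hp with ⟨hy, hr⟩
    cases i with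
    | zero =>
      simp only [List.getD_cons_zero]
      rw [countLE_cons]
      by_cases hyx : y ≤ x
      · rw [if_pos hyx]; constructor <;> intro <;> omega
      · rw [if_neg hyx]
        have hr0 : countLE x r = 0 :=
          countLE_eq_zero x r (fun w hw => by have := hy w hw; omega)
        rw [hr0]; constructor <;> intro <;> omega
    | succ i' =>
      simp only [List.getD_cons_succ]
      have hi' : i' < r.length := by simp at hi; omega
      rw [countLE_cons, ih hr i' hi']
      by_cases hyx : y ≤ x
      · rw [if_pos hyx]; constructor <;> intro <;> omega
      · rw [if_neg hyx]
        have hr0 : countLE x r = 0 :=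
          countLE_eq_zero x r (fun w hw => by have := hy w hw; omega)
        have hmem : r.getD i' 0 ∈ r := by
          rw [List.getD_eq_getElem r 0 hi']; exact List.getElem_mem hi'
        have := hy _ hmem
        rw [hr0]; constructor <;> intro <;> omega

lemma sorted_getD_mono :
    ∀ (s : List Int), List.Pairwise (· ≤ ·) s → ∀ i j, i ≤ j → j < s.length →
      s.getD i 0 ≤ s.getD j 0 := by
  intro s
  induction s with
  | nil => intro _ i j _ hj; simp at hj
  | cons y r ih =>
    intro hp i j hij hj
    rcases List.pairwise_cons.1 hp with ⟨hy, hr⟩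
    cases j with
    | zero =>
      have : i = 0 := by omega
      subst this; exact le_refl _
    | succ j' =>
      have hj' : j' < r.length := by simp at hj; omega
      cases i with
      | zero =>
        simp only [List.getD_cons_zero, List.getD_cons_succ]
        have hmem : r.getD j' 0 ∈ r := by
          rw [List.getD_eq_getElem r 0 hj']; exact List.getElem_mem hj'
        exact hy _ hmem
      | succ i' =>
        simp only [List.getD_cons_succ]
        exact ih hr i' j' (by omega) hj'

lemma lo_eq_countLE (x : Int) (s : List Int) (hs : List.Pairwise (· ≤ ·) s) (lo : Nat)
    (hlo : lo ≤ s.length)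
    (h1 : ∀ i, i < lo → s.getD i 0 ≤ x)
    (h2 : ∀ i, lo ≤ i → i < s.length → x < s.getD i 0) :
    lo = countLE x s := by
  have hcl := countLE_le_length x s
  have hA : lo ≤ countLE x s := by
    by_cases h0 : lo = 0
    · omega
    · have h := (countLE_iff x s hs (lo - 1) (by omega)).1 (h1 _ (by omega))
      omega
  have hB : countLE x s ≤ lo := by
    by_contra hc
    rw [not_le] at hc
    have hl : lo < s.length := lt_of_lt_of_le hc hcl
    have hle := (countLE_iff x s hs lo hl).2 hc
    have := h2 lo (le_refl _) hl
    omega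
  omega

lemma brLoop_eq_countLE (x : Int) (s : List Int) (hs : List.Pairwise (· ≤ ·) s) :
    ∀ (k lo hi : Nat), hi - lo ≤ k → lo ≤ hi → hi ≤ s.length →
      (∀ i, i < lo → s.getD i 0 ≤ x) →
      (∀ i, hi ≤ i → i < s.length → x < s.getD i 0) →
      brLoop s x lo hi = countLE x s := by
  intro k
  induction k with
  | zero =>
    intro lo hi hk hle hlen h1 h2
    have heq : lo = hi := by omega
    subst heq
    rw [brLoop, dif_neg (lt_irrefl _)]
    exact lo_eq_countLE x s hs lo hlen h1 h2
  | succ k ih =>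
    intro lo hi hk hle hlen h1 h2
    rw [brLoop]
    by_cases h : lo < hi
    · rw [dif_pos h]
      by_cases hx : x < s.getD ((lo + hi) / 2) 0
      · rw [if_pos hx]
        refine ih lo ((lo + hi) / 2) (by omega) (by omega) (by omega) h1 ?_
        intro i hi1 hi2
        have := sorted_getD_mono s hs ((lo + hi) / 2) i hi1 hi2
        omega
      · rw [if_neg hx]
        refine ih ((lo + hi) / 2 + 1) hi (by omega) (by omega) hlen ?_ h2
        intro i hi1
        have := sorted_getD_mono s hs i ((lo + hi) / 2) (by omega) (by omega)
        omega
    · rw [dif_neg h]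
      exact lo_eq_countLE x s hs lo (by omega) h1
        (fun i hi1 hi2 => h2 i (by omega) hi2)

lemma bisectRight_eq (x : Int) (s : List Int) (hs : List.Pairwise (· ≤ ·) s) :
    bisectRight s x = countLE x s := by
  exact brLoop_eq_countLE x s hs s.length 0 s.length (by omega) (by omega) (le_refl _)
    (fun i hi => absurd hi (by omega)) (fun i h1 h2 => absurd h1 (by omega))

lemma plateau (x : Int) :
    ∀ (r : List Int) (y : Int), List.Pairwise (· ≤ ·) (y :: r) → x < y →
      fChain x y r = countLE y r := by
  intro r
  induction r with
  | nil => intro y _ _; simp [fChain, countLE]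
  | cons z r' ih =>
    intro y hp hxy
    rcases List.pairwise_cons.1 hp with ⟨hy, hp'⟩
    have hyz : y ≤ z := hy z (by simp)
    rcases List.pairwise_cons.1 hp' with ⟨hz, _⟩
    have habs1 : |x - z| = z - x := by rw [abs_of_nonpos (by omega)]; ring
    have habs2 : |x - y| = y - x := by rw [abs_of_nonpos (by omega)]; ring
    simp only [fChain, habs1, habs2]
    by_cases hzy : z ≤ y
    · have hz_eq : z = y := le_antisymm hzy hyz
      subst hz_eq
      rw [if_pos (by omega), ih z hp' (by omega), countLE_cons, if_pos (le_refl z)]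
    · rw [if_neg (by omega), countLE_cons, if_neg hzy,
        countLE_eq_zero y r' (fun w hw => by have := hz w hw; omega)]

lemma chain_eq_formula (x : Int) :
    ∀ (r : List Int) (y : Int), List.Pairwise (· ≤ ·) (y :: r) → y ≤ x →
      fChain x y r =
        (if countLE x (y :: r) = (y :: r).length then countLE x (y :: r) - 1
         else if x - (y :: r).getD (countLE x (y :: r) - 1) 0 <
                (y :: r).getD (countLE x (y :: r)) 0 - x then countLE x (y :: r) - 1
         else countLE ((y :: r).getD (countLE x (y :: r)) 0) (y :: r) - 1) := by
  intro r
  induction r with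
  | nil =>
    intro y _ hyx
    have hc : countLE x [y] = 1 := by simp [countLE, hyx]
    simp [fChain, hc]
  | cons z r' ih =>
    intro y hp hyx
    rcases List.pairwise_cons.1 hp with ⟨hy, hp'⟩
    have hyz : y ≤ z := hy z (by simp)
    rcases List.pairwise_cons.1 hp' with ⟨hz, _⟩
    have hcr : countLE x (y :: z :: r') = (if y ≤ x then 1 else 0) + countLE x (z :: r') :=
      countLE_cons x y (z :: r')
    by_cases hzx : z ≤ x
    · -- the new head is still ≤ x: everything shifts by one
      have habs1 : |x - z| = x - z := abs_of_nonneg (by omega)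
      have habs2 : |x - y| = x - y := abs_of_nonneg (by omega)
      simp only [fChain, habs1, habs2]
      rw [if_pos (by omega), ih z hp' hzx]
      have hc1 : 1 ≤ countLE x (z :: r') := by rw [countLE_cons, if_pos hzx]; omega
      obtain ⟨c'', hc''⟩ : ∃ c'', countLE x (z :: r') = c'' + 1 :=
        ⟨countLE x (z :: r') - 1, by omega⟩
      have hcn : countLE x (y :: z :: r') = c'' + 2 := by
        rw [hcr, if_pos hyx, hc'']
        omega
      rw [hcn, hc'']
      simp only [List.length_cons, List.getD_cons_succ,
        show c'' + 2 - 1 = c'' + 1 from rfl, show c'' + 1 - 1 = c'' from rfl]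
      by_cases hn : c'' + 1 = r'.length + 1
      · rw [if_pos hn, if_pos (show c'' + 2 = r'.length + 1 + 1 by omega)]
        omega
      · rw [if_neg hn, if_neg (show ¬ (c'' + 2 = r'.length + 1 + 1) by omega)]
        by_cases hd : x - (z :: r').getD c'' 0 < r'.getD c'' 0 - x
        · rw [if_pos hd, if_pos hd]
          omega
        · rw [if_neg hd, if_neg hd]
          have hlt : c'' + 1 < (z :: r').length := by
            have := countLE_le_length x (z :: r')
            rw [hc''] at this
            simp only [List.length_cons] at this ⊢
            omega
          have hb_gt : x < r'.getD c'' 0 := by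
            have hiff := countLE_iff x (z :: r') hp' (c'' + 1) hlt
            rw [hc''] at hiff
            simp only [List.getD_cons_succ] at hiff
            omega
          rw [countLE_cons (r'.getD c'' 0) y (z :: r'),
            if_pos (show y ≤ r'.getD c'' 0 by omega)]
          have hone : 1 ≤ countLE (r'.getD c'' 0) (z :: r') := by
            rw [countLE_cons, if_pos (show z ≤ r'.getD c'' 0 by omega)]; omega
          omega
    · -- the new element is the first one > x
      have hz0 : countLE x (z :: r') = 0 := by
        refine countLE_eq_zero x (z :: r') (fun w hw => ?_)
        rcases List.mem_cons.1 hw with h | h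
        · omega
        · have := hz w h; omega
      have hc1 : countLE x (y :: z :: r') = 1 := by rw [hcr, if_pos hyx, hz0]
      have habs1 : |x - z| = z - x := by rw [abs_of_nonpos (by omega)]; ring
      have habs2 : |x - y| = x - y := abs_of_nonneg (by omega)
      simp only [fChain]
      rw [hc1]
      simp only [List.length_cons, List.getD_cons_zero, List.getD_cons_succ,
        show (1 : Nat) - 1 = 0 from rfl]
      rw [if_neg (show ¬ ((1 : Nat) = r'.length + 1 + 1) by omega)]
      by_cases hd : x - y < z - x
      · rw [if_neg (show ¬ (|x - z| ≤ |x - y|) by rw [habs1, habs2]; omega), if_pos hd]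
      · rw [if_pos (show |x - z| ≤ |x - y| by rw [habs1, habs2]; omega),
          if_neg hd, plateau x r' z hp' (by omega),
          countLE_cons, if_pos hyz, countLE_cons, if_pos (le_refl z)]
        omega


lemma innerA_break (x y : Int) (r : List Int) (j : Nat) (m : Int) (matched : Nat)
    (h : ¬ (|x - y| ≤ m)) : innerA x (y :: r) j m matched = matched := by
  simp only [innerA, if_neg h]
  rw [if_pos (by omega)]

lemma innerA_neg (x : Int) :
    ∀ (s : List Int) (j : Nat) (m : Int) (matched : Nat),
      innerA (-x) (s.map (fun v => -v)) j m matched = innerA x s j m matched := by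
  intro s
  induction s with
  | nil => intro j m matched; rfl
  | cons y rest ih =>
    intro j m matched
    have habs : |(-x) - (-y)| = |x - y| := by
      rw [show (-x) - (-y) = -(x - y) by ring, abs_neg]
    simp only [List.map_cons, innerA, habs]
    by_cases h1 : |x - y| ≤ m
    · simp only [if_pos h1]
      by_cases h2 : |x - y| < |x - y|
      · simp only [if_pos h2]
      · simp only [if_neg h2, ih]
    · simp only [if_neg h1]
      by_cases h2 : m < |x - y|
      · simp only [if_pos h2]
      · simp only [if_neg h2, ih]

lemma fChain_neg (x : Int) :
    ∀ (r : List Int) (y : Int), fChain (-x) (-y) (r.map (fun v => -v)) = fChain x y r := by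
  intro r
  induction r with
  | nil => intro y; rfl
  | cons z r' ih =>
    intro y
    have habs1 : |(-x) - (-z)| = |x - z| := by
      rw [show (-x) - (-z) = -(x - z) by ring, abs_neg]
    have habs2 : |(-x) - (-y)| = |x - y| := by
      rw [show (-x) - (-y) = -(x - y) by ring, abs_neg]
    simp only [List.map_cons, fChain, habs1, habs2]
    by_cases h : |x - z| ≤ |x - y|
    · simp only [if_pos h, ih]
    · simp only [if_neg h]

lemma desc_neg_asc (s : List Int) (h : List.Pairwise (· ≥ ·) s) :
    List.Pairwise (· ≤ ·) (s.map (fun v => -v)) := by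
  rw [List.pairwise_map]
  exact h.imp (fun hab => by omega)

lemma desc_getD_mono :
    ∀ (s : List Int), List.Pairwise (· ≥ ·) s → ∀ i j, i ≤ j → j < s.length →
      s.getD j 0 ≤ s.getD i 0 := by
  intro s
  induction s with
  | nil => intro _ i j _ hj; simp at hj
  | cons y r ih =>
    intro hp i j hij hj
    rcases List.pairwise_cons.1 hp with ⟨hy, hr⟩
    cases j with
    | zero =>
      have : i = 0 := by omega
      subst this; exact le_refl _
    | succ j' =>
      have hj' : j' < r.length := by simp at hj; omega
      cases i with
      | zero =>
        simp only [List.getD_cons_zero, List.getD_cons_succ]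
        have hmem : r.getD j' 0 ∈ r := by
          rw [List.getD_eq_getElem r 0 hj']; exact List.getElem_mem hj'
        exact hy _ hmem
      | succ i' =>
        simp only [List.getD_cons_succ]
        exact ih hr i' j' (by omega) hj'

lemma asc_of_desc_le (s : List Int) (hd : List.Pairwise (· ≥ ·) s)
    (hle : s.getD 0 0 ≤ s.getD (s.length - 1) 0) : List.Pairwise (· ≤ ·) s := by
  rw [List.pairwise_iff_getElem]
  intro i j hi hj hij
  have h1 : s.getD i 0 ≤ s.getD 0 0 := desc_getD_mono s hd 0 i (by omega) hi
  have h2 : s.getD (s.length - 1) 0 ≤ s.getD j 0 := desc_getD_mono s hd j (s.length - 1) (by omega) (by omega)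
  rw [List.getD_eq_getElem s 0 hi] at h1
  rw [List.getD_eq_getElem s 0 hj] at h2
  omega

lemma alt_asc (x y : Int) (r : List Int) (hs : List.Pairwise (· ≤ ·) (y :: r)) :
    altIdx x (y :: r) = fChain x y r := by
  have hbr : ∀ a : Int, bisectRight (y :: r) a = countLE a (y :: r) :=
    fun a => bisectRight_eq a _ hs
  simp only [altIdx, hbr]
  by_cases hyx : y ≤ x
  · have h0 : countLE x (y :: r) ≠ 0 := by rw [countLE_cons, if_pos hyx]; omega
    rw [if_neg h0]
    exact (chain_eq_formula x r y hs hyx).symm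
  · have h0 : countLE x (y :: r) = 0 := by
      refine countLE_eq_zero x (y :: r) (fun w hw => ?_)
      rcases List.mem_cons.1 hw with h | h
      · omega
      · have := List.pairwise_cons.1 hs |>.1 w h; omega
    rw [h0, if_pos rfl]
    simp only [List.getD_cons_zero]
    rw [plateau x r y hs (by omega), countLE_cons, if_pos (le_refl y)]
    omega

lemma per_elem_asc (x y : Int) (r : List Int) (hs : List.Pairwise (· ≤ ·) (y :: r))
    (hnc : 2 ≤ (y :: r).length →
      ¬ (999999999 < |x - y| ∧ |x - (y :: r).getD 1 0| ≤ |x - y|)) :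
    innerA x (y :: r) 0 999999999 0 = altIdx x (y :: r) := by
  rw [alt_asc x y r hs]
  by_cases hg : |x - y| ≤ 999999999
  · exact innerA_top x y r hg
  · rw [innerA_break x y r 0 999999999 0 hg]
    cases r with
    | nil => rfl
    | cons z r' =>
      have hnc' := hnc (by simp)
      simp only [List.getD_cons_succ, List.getD_cons_zero] at hnc'
      have hzc : ¬ (|x - z| ≤ |x - y|) := fun hc => hnc' ⟨by omega, hc⟩
      simp [fChain, hzc]

lemma fChain_pos (x y z : Int) (r' : List Int) (h : |x - z| ≤ |x - y|) :
    1 ≤ fChain x y (z :: r') := by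
  simp only [fChain, if_pos h]
  omega

-- ===== VERDICT (by name: the statements are the Claim_ definitions above) =====
theorem syncTwoSequences_spec : Claim_unchanged_syncTwoSequences := by
  unfold Claim_unchanged_syncTwoSequences Spec_syncTwoSequences
  intro seq1 seq2 _ hpre hnD
  cases seq2 with
  | nil =>
    rw [syncTwoSequences, syncTwoSequences_alt, foldl_app_eq_map]
    simp [innerA]
  | cons y r =>
    rw [syncTwoSequences, foldl_app_eq_map]
    simp only [List.nil_append]
    have hnc : ∀ x ∈ seq1, 2 ≤ (y :: r).length →
        ¬ (999999999 < |x - y| ∧ |x - (y :: r).getD 1 0| ≤ |x - y|) := by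
      intro x hx hlen hcond
      exact hnD ⟨x, hx, hlen, by simpa using hcond⟩
    rw [syncTwoSequences_alt, if_neg (by simp)]
    by_cases hdir : (y :: r).getD ((y :: r).length - 1) 0 < (y :: r).getD 0 0
    · rw [if_pos hdir]
      have hdesc : List.Pairwise (· ≥ ·) (y :: r) := by
        rcases hpre with hasc | hdesc
        · exfalso
          have := sorted_getD_mono (y :: r) hasc 0 ((y :: r).length - 1) (by omega)
            (by simp)
          omega
        · exact hdesc
      rw [syncAsc, List.map_map]
      apply List.map_congr_left
      intro x hx
      have hmap : (y :: r).map (fun v => -v) = (-y) :: r.map (fun v => -v) := rfl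
      have hs' : List.Pairwise (· ≤ ·) ((-y) :: r.map (fun v => -v)) := by
        have := desc_neg_asc (y :: r) hdesc
        rwa [hmap] at this
      have hnc' : 2 ≤ ((-y) :: r.map (fun v => -v)).length →
          ¬ (999999999 < |(-x) - (-y)| ∧
             |(-x) - ((-y) :: r.map (fun v => -v)).getD 1 0| ≤ |(-x) - (-y)|) := by
        intro hlen
        cases r with
        | nil => simp at hlen
        | cons z r' =>
          have h := hnc x hx (by simp)
          simp only [List.getD_cons_succ, List.getD_cons_zero] at h ⊢
          rw [show (-x) - (-y) = -(x - y) by ring, abs_neg,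
            List.map_cons, List.getD_cons_zero,
            show (-x) - (-z) = -(x - z) by ring, abs_neg]
          exact h
      have hkey := per_elem_asc (-x) (-y) (r.map (fun v => -v)) hs' hnc'
      rw [← hmap] at hkey
      rw [innerA_neg x (y :: r) 0 999999999 0] at hkey
      simp only [Function.comp_apply]
      rw [hkey, hmap]
    · rw [if_neg hdir]
      have hasc : List.Pairwise (· ≤ ·) (y :: r) := by
        rcases hpre with hasc | hdesc
        · exact hasc
        · exact asc_of_desc_le (y :: r) hdesc (by omega)
      rw [syncAsc]
      apply List.map_congr_left
      intro x hx
      exact congrArg _ (per_elem_asc x y r hasc (hnc x hx))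

theorem syncTwoSequences_changed : Claim_changed_syncTwoSequences := by
  unfold Claim_changed_syncTwoSequences
  refine ⟨by decide, by decide, by decide, by decide, ?_, by decide⟩
  show syncTwoSequences_alt [1000000001] [0, 1000000001] = [1]
  have hs : List.Pairwise (· ≤ ·) ([0, 1000000001] : List Int) := by decide
  have hbr : ∀ a : Int, bisectRight [0, 1000000001] a = countLE a [0, 1000000001] :=
    fun a => bisectRight_eq a _ hs
  simp only [syncTwoSequences_alt, syncAsc, altIdx, hbr]
  decide

theorem syncTwoSequences_tight : Claim_exact_syncTwoSequences := by
  unfold Claim_exact_syncTwoSequences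
  intro seq1 seq2 _ hpre hD heq
  obtain ⟨x, hx, hlen, hfar, hnear⟩ := hD
  cases seq2 with
  | nil => simp at hlen
  | cons y r =>
  cases r with
  | nil => simp at hlen
  | cons z r' =>
  simp only [List.getD_cons_succ, List.getD_cons_zero] at hfar hnear
  rw [syncTwoSequences, foldl_app_eq_map] at heq
  simp only [List.nil_append] at heq
  rw [syncTwoSequences_alt, if_neg (by simp)] at heq
  have hA0 : innerA x (y :: z :: r') 0 999999999 0 = 0 :=
    innerA_break x y (z :: r') 0 999999999 0 (by omega)
  have hBpos : 1 ≤ fChain x y (z :: r') := fChain_pos x y z r' hnear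
  by_cases hdir : (y :: z :: r').getD ((y :: z :: r').length - 1) 0 <
      (y :: z :: r').getD 0 0
  · rw [if_pos hdir] at heq
    have hdesc : List.Pairwise (· ≥ ·) (y :: z :: r') := by
      rcases hpre with hasc | hdesc
      · exfalso
        have := sorted_getD_mono (y :: z :: r') hasc 0 ((y :: z :: r').length - 1)
          (by omega) (by simp)
        omega
      · exact hdesc
    rw [syncAsc, List.map_map] at heq
    have := (List.map_inj_left).1 heq x hx
    simp only [Function.comp_apply] at this
    have hmap : (y :: z :: r').map (fun v => -v) =
        (-y) :: (-z) :: r'.map (fun v => -v) := rfl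
    have hs' : List.Pairwise (· ≤ ·) ((-y) :: (-z) :: r'.map (fun v => -v)) := by
      have h2 := desc_neg_asc (y :: z :: r') hdesc
      rwa [hmap] at h2
    have halt : altIdx (-x) ((y :: z :: r').map (fun v => -v)) =
        fChain (-x) (-y) ((z :: r').map (fun v => -v)) := by
      rw [hmap]
      exact alt_asc (-x) (-y) ((-z) :: r'.map (fun v => -v)) hs'
    rw [halt, fChain_neg x (z :: r') y] at this
    rw [hA0] at this
    omega
  · rw [if_neg hdir] at heq
    have hasc : List.Pairwise (· ≤ ·) (y :: z :: r') := by
      rcases hpre with hasc | hdesc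
      · exact hasc
      · exact asc_of_desc_le (y :: z :: r') hdesc (by omega)
    rw [syncAsc] at heq
    have := (List.map_inj_left).1 heq x hx
    rw [hA0, alt_asc x y (z :: r') hasc] at this
    omega
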